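-- pv_equiv track=rewrite | github.com/MingyuGuan/rpc | actor/actor_rpc.py | string_to_input_type
-- ===== SOURCE A (Python) =====
-- INPUT_TYPE_BYTES = 0
--
-- INPUT_TYPE_INTS = 1
--
-- INPUT_TYPE_FLOATS = 2
--
-- INPUT_TYPE_DOUBLES = 3
--
-- INPUT_TYPE_STRINGS = 4
--
-- INPUT_TYPE_ABSTRACT = 5
--
-- def string_to_input_type(input_str):
--     input_str = input_str.strip().lower()
--     byte_strs = ["b", "bytes", "byte"]
--     int_strs = ["i", "ints", "int", "integer", "integers", "builtins.int"]
--     float_strs = ["f", "floats", "float", "builtins.float"]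
--     double_strs = ["d", "doubles", "double"]
--     string_strs = ["s", "strings", "string", "strs", "str", "builtins.str"]
--
--     if any(input_str == s for s in byte_strs):
--         return INPUT_TYPE_BYTES
--     elif any(input_str == s for s in int_strs):
--         return INPUT_TYPE_INTS
--     elif any(input_str == s for s in float_strs):
--         return INPUT_TYPE_FLOATS
--     elif any(input_str == s for s in double_strs):
--         return INPUT_TYPE_DOUBLES
--     elif any(input_str == s for s in string_strs):
--         return INPUT_TYPE_STRINGS
--     else:
--         return INPUT_TYPE_ABSTRACT
-- ===== SOURCE B (Python) =====
-- INPUT_TYPE_BYTES = 0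
-- INPUT_TYPE_INTS = 1
-- INPUT_TYPE_FLOATS = 2
-- INPUT_TYPE_DOUBLES = 3
-- INPUT_TYPE_STRINGS = 4
-- INPUT_TYPE_ABSTRACT = 5
--
-- def string_to_input_type(input_str):
--     # Decision tree: one inspection of the leading character selects the only
--     # candidate group (b/i/f/d/s), then a single in-group comparison decides.
--     t = input_str.strip().lower()
--     if not t:
--         return INPUT_TYPE_ABSTRACT
--     c = t[0]
--     if c == 'b':
--         if t in ('b', 'byte', 'bytes'):
--             return INPUT_TYPE_BYTES
--         if t == 'builtins.int':
--             return INPUT_TYPE_INTS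
--         if t == 'builtins.float':
--             return INPUT_TYPE_FLOATS
--         if t == 'builtins.str':
--             return INPUT_TYPE_STRINGS
--         return INPUT_TYPE_ABSTRACT
--     if c == 'i':
--         return INPUT_TYPE_INTS if t in ('i', 'int', 'ints', 'integer', 'integers') else INPUT_TYPE_ABSTRACT
--     if c == 'f':
--         return INPUT_TYPE_FLOATS if t in ('f', 'float', 'floats') else INPUT_TYPE_ABSTRACT
--     if c == 'd':
--         return INPUT_TYPE_DOUBLES if t in ('d', 'double', 'doubles') else INPUT_TYPE_ABSTRACT
--     if c == 's':
--         return INPUT_TYPE_STRINGS if t in ('s', 'str', 'strs', 'string', 'strings') else INPUT_TYPE_ABSTRACT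
--     return INPUT_TYPE_ABSTRACT
-- ===== Notes on version B (the rewrite author's own statement) =====
-- stated objective: alternative
-- what changed: Replaces A's five sequential any(==) scans over all 22 spellings with a decision tree that dispatches once on the leading character of the normalized string and then decides inside the single selected group (the b-branch alone distinguishes byte spellings from the builtins.* spellings, which carry three different codes).
import Mathlib
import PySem

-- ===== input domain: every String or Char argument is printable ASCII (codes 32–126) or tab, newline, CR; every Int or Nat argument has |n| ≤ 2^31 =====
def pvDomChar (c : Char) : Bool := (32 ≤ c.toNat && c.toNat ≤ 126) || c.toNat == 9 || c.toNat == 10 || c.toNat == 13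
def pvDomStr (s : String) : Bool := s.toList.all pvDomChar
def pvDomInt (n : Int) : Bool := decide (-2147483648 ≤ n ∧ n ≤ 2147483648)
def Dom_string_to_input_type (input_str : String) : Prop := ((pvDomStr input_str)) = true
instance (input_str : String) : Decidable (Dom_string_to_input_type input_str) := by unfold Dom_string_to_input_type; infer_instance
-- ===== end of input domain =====

-- B replaces A's five sequential any(==) scans with a decision tree dispatching on the first character of the normalized string (alternative decomposition; no speed claim).

-- ===== PORT A =====
def string_to_input_type (input_str : String) : Int :=
  let t := PySem.Str.lower (PySem.Str.strip input_str)
  let byte_strs : List String := ["b", "bytes", "byte"]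
  let int_strs : List String := ["i", "ints", "int", "integer", "integers", "builtins.int"]
  let float_strs : List String := ["f", "floats", "float", "builtins.float"]
  let double_strs : List String := ["d", "doubles", "double"]
  let string_strs : List String := ["s", "strings", "string", "strs", "str", "builtins.str"]
  if byte_strs.any (fun s => t == s) then 0
  else if int_strs.any (fun s => t == s) then 1
  else if float_strs.any (fun s => t == s) then 2
  else if double_strs.any (fun s => t == s) then 3
  else if string_strs.any (fun s => t == s) then 4
  else 5

-- ===== PORT B =====
-- 'if not t: …; c = t[0]' is ported as a match on t[0] (PySem.Str.pyGet? t 0 = none ↔ t empty).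
def string_to_input_type_alt (input_str : String) : Int :=
  let t := PySem.Str.lower (PySem.Str.strip input_str)
  match PySem.Str.pyGet? t 0 with
  | none => 5
  | some c =>
    if c = 'b' then
      if (["b", "byte", "bytes"] : List String).contains t then 0
      else if t == "builtins.int" then 1
      else if t == "builtins.float" then 2
      else if t == "builtins.str" then 4
      else 5
    else if c = 'i' then
      if (["i", "int", "ints", "integer", "integers"] : List String).contains t then 1 else 5
    else if c = 'f' then
      if (["f", "float", "floats"] : List String).contains t then 2 else 5
    else if c = 'd' then
      if (["d", "double", "doubles"] : List String).contains t then 3 else 5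
    else if c = 's' then
      if (["s", "str", "strs", "string", "strings"] : List String).contains t then 4 else 5
    else 5

-- ===== PRECONDITION & SPEC =====
def Spec_string_to_input_type (input_str : String) (out : Int) : Prop := out = string_to_input_type_alt input_str
instance (input_str : String) (out : Int) : Decidable (Spec_string_to_input_type input_str out) := by unfold Spec_string_to_input_type; infer_instance

-- ===== CLAIM (what is proved, stated in full; the proofs are below) =====
def Claim_equal_string_to_input_type : Prop := ∀ (input_str : String), Dom_string_to_input_type input_str → Spec_string_to_input_type input_str (string_to_input_type input_str)

-- ===== LEMMAS AND PROOFS =====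

-- A's core (after normalization) written on an arbitrary string t.
def pvACore (t : String) : Int :=
  if (["b", "bytes", "byte"] : List String).any (fun s => t == s) then 0
  else if (["i", "ints", "int", "integer", "integers", "builtins.int"] : List String).any (fun s => t == s) then 1
  else if (["f", "floats", "float", "builtins.float"] : List String).any (fun s => t == s) then 2
  else if (["d", "doubles", "double"] : List String).any (fun s => t == s) then 3
  else if (["s", "strings", "string", "strs", "str", "builtins.str"] : List String).any (fun s => t == s) then 4
  else 5

-- B's core (after normalization) written on an arbitrary string t.
def pvBCore (t : String) : Int :=
  match PySem.Str.pyGet? t 0 with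
  | none => 5
  | some c =>
    if c = 'b' then
      if (["b", "byte", "bytes"] : List String).contains t then 0
      else if t == "builtins.int" then 1
      else if t == "builtins.float" then 2
      else if t == "builtins.str" then 4
      else 5
    else if c = 'i' then
      if (["i", "int", "ints", "integer", "integers"] : List String).contains t then 1 else 5
    else if c = 'f' then
      if (["f", "float", "floats"] : List String).contains t then 2 else 5
    else if c = 'd' then
      if (["d", "double", "doubles"] : List String).contains t then 3 else 5
    else if c = 's' then
      if (["s", "str", "strs", "string", "strings"] : List String).contains t then 4 else 5
    else 5

set_option maxHeartbeats 4000000 in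
theorem pv_core (t : String) : pvACore t = pvBCore t := by
  by_cases h0 : t = "b";  · subst h0; decide
  by_cases h1 : t = "bytes";  · subst h1; decide
  by_cases h2 : t = "byte";  · subst h2; decide
  by_cases h3 : t = "i";  · subst h3; decide
  by_cases h4 : t = "ints";  · subst h4; decide
  by_cases h5 : t = "int";  · subst h5; decide
  by_cases h6 : t = "integer";  · subst h6; decide
  by_cases h7 : t = "integers";  · subst h7; decide
  by_cases h8 : t = "builtins.int";  · subst h8; decide
  by_cases h9 : t = "f";  · subst h9; decide
  by_cases h10 : t = "floats";  · subst h10; decide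
  by_cases h11 : t = "float";  · subst h11; decide
  by_cases h12 : t = "builtins.float";  · subst h12; decide
  by_cases h13 : t = "d";  · subst h13; decide
  by_cases h14 : t = "doubles";  · subst h14; decide
  by_cases h15 : t = "double";  · subst h15; decide
  by_cases h16 : t = "s";  · subst h16; decide
  by_cases h17 : t = "strings";  · subst h17; decide
  by_cases h18 : t = "string";  · subst h18; decide
  by_cases h19 : t = "strs";  · subst h19; decide
  by_cases h20 : t = "str";  · subst h20; decide
  by_cases h21 : t = "builtins.str";  · subst h21; decide
  -- default: both sides are 5
  have ha : pvACore t = 5 := by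
    simp [pvACore, h0, h1, h2, h3, h4, h5, h6, h7, h8, h9, h10, h11, h12, h13, h14, h15, h16, h17, h18, h19, h20, h21]
  have hb : pvBCore t = 5 := by
    unfold pvBCore
    cases hg : PySem.Str.pyGet? t 0 with
    | none => rfl
    | some c =>
      simp [h0, h1, h2, h3, h4, h5, h6, h7, h8, h9, h10, h11, h12, h13, h14, h15, h16, h17, h18, h19, h20, h21]
  rw [ha, hb]

theorem pv_a_bridge (s : String) : string_to_input_type s = pvACore (PySem.Str.lower (PySem.Str.strip s)) := rfl

theorem pv_b_bridge (s : String) : string_to_input_type_alt s = pvBCore (PySem.Str.lower (PySem.Str.strip s)) := rfl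
-- ===== VERDICT (by name: the statement is the Claim_ definition above) =====
theorem string_to_input_type_spec : Claim_equal_string_to_input_type := by
  intro s _
  unfold Spec_string_to_input_type
  rw [pv_a_bridge, pv_b_bridge]
  exact pv_core _
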